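-- pv_equiv track=rewrite | github.com/searsam1/theEdabitProject | Python/elasticize/elasticize.py | elasticize
-- ===== SOURCE A (Python) =====
-- def elasticize(word):
--
--
--
-- 	if not len(word) % 2:
-- 		idx = len(word) // 2
-- 		left,right = word[:idx], word[idx:]
-- 		left = "".join(left[i]*(i+1) for i in range(len(left)))
-- 		right = "".join(right[i]*(len(right)-i) for i in range(len(right)))
-- 		return left + right
-- 	else:
-- 		idx = len(word) // 2
-- 		middle = word[idx] * (idx + 1)
-- 		word = word[:idx] + word[idx + 1:]
-- 		left,right = word[:idx], word[idx:]
-- 		left = "".join(left[i]*(i+1) for i in range(len(left)))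
-- 		right = "".join(right[i]*(len(right)-i) for i in range(len(right)))
--
-- 		return left + middle + right
-- ===== SOURCE B (Python) =====
-- def elasticize(word):
--     n = len(word)
--     return "".join(word[k] * min(k + 1, n - k) for k in range(n))
-- ===== Notes on version B (the rewrite author's own statement) =====
-- stated objective: simpler
-- what changed: Replaces the even/odd split into left half, optional middle, and right half (three separate joins plus string surgery to remove the middle char) by one uniform pass: each position k is repeated min(k+1, n-k) times, since that single formula equals the left count k+1, the right count n-k, and the odd middle count idx+1.
import Mathlib
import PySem

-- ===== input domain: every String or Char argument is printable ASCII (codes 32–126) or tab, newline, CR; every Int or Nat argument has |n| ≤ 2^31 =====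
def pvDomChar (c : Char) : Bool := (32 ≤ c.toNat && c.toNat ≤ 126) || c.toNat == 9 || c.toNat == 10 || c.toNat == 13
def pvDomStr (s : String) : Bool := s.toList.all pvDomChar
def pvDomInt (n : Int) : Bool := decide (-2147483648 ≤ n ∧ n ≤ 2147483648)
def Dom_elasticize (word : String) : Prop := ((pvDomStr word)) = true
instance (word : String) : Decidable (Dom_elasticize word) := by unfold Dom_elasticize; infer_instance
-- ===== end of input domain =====

-- B replaces A's even/odd split with left/middle/right joins by one uniform pass
-- repeating position k exactly min(k+1, n-k) times; objective: simpler.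


-- ===== PORT A =====
-- "".join(l[i]*(i+1) for i in range(len(l)))
def pvLeftA (l : List Char) : List Char :=
  ((PySem.List.pyRange 0 (l.length : Int) 1).map
    (fun i => List.replicate (i + 1).toNat (PySem.List.pyGetD l i ' '))).flatten

-- "".join(l[i]*(len(l)-i) for i in range(len(l)))
def pvRightA (l : List Char) : List Char :=
  ((PySem.List.pyRange 0 (l.length : Int) 1).map
    (fun i => List.replicate ((l.length : Int) - i).toNat (PySem.List.pyGetD l i ' '))).flatten

def elasticize (word : String) : String :=
  let cs := word.toList
  let n : Int := cs.length
  if PySem.Int.mod n 2 = 0 then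
    let idx := PySem.Int.floordiv n 2
    let left := PySem.List.slice cs none (some idx)
    let right := PySem.List.slice cs (some idx) none
    String.ofList (pvLeftA left ++ pvRightA right)
  else
    let idx := PySem.Int.floordiv n 2
    let middle := List.replicate (idx + 1).toNat (PySem.List.pyGetD cs idx ' ')
    let w := PySem.List.slice cs none (some idx) ++ PySem.List.slice cs (some (idx + 1)) none
    let left := PySem.List.slice w none (some idx)
    let right := PySem.List.slice w (some idx) none
    String.ofList (pvLeftA left ++ middle ++ pvRightA right)

-- ===== PORT B =====
-- "".join(word[k] * min(k+1, n-k) for k in range(n))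
def elasticize_alt (word : String) : String :=
  let cs := word.toList
  let n : Int := cs.length
  String.ofList (((PySem.List.pyRange 0 n 1).map
    (fun k => List.replicate (min (k + 1) (n - k)).toNat (PySem.List.pyGetD cs k ' '))).flatten)

-- ===== PRECONDITION & SPEC =====
def Spec_elasticize (word : String) (out : String) : Prop := out = elasticize_alt word
instance (word : String) (out : String) : Decidable (Spec_elasticize word out) := by unfold Spec_elasticize; infer_instance

-- ===== CLAIM (what is proved, stated in full; the proofs are below) =====
def Claim_equal_elasticize : Prop := ∀ (word : String), Dom_elasticize word → Spec_elasticize word (elasticize word)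

-- ===== LEMMAS AND PROOFS =====

-- Nat-indexed normal forms of the three joins
def pvPL (l : List Char) : List Char :=
  ((List.range l.length).map (fun i => List.replicate (i + 1) (l.getD i ' '))).flatten

def pvPR (l : List Char) : List Char :=
  ((List.range l.length).map (fun i => List.replicate (l.length - i) (l.getD i ' '))).flatten

def pvCB (cs : List Char) : List Char :=
  ((List.range cs.length).map
    (fun k => List.replicate (min (k + 1) (cs.length - k)) (cs.getD k ' '))).flatten

theorem pvRange_int_to_nat (m : Nat) (g : Int → List Char) :
    (PySem.List.pyRange 0 (m : Int) 1).map g = (List.range m).map (fun (k : Nat) => g (k : Int)) := by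
  rw [PySem.List.pyRange_one]
  have h : ((m : Int) - 0).toNat = m := by omega
  rw [h, List.map_map]
  refine List.map_congr_left ?_
  intro k _
  simp

theorem pvLeftA_eq (l : List Char) : pvLeftA l = pvPL l := by
  unfold pvLeftA pvPL
  rw [pvRange_int_to_nat]
  congr 1
  refine List.map_congr_left ?_
  intro i hi
  simp only [List.mem_range] at hi
  have h1 : ((i : Int) + 1).toNat = i + 1 := by omega
  simp [h1]

theorem pvRightA_eq (l : List Char) : pvRightA l = pvPR l := by
  unfold pvRightA pvPR
  rw [pvRange_int_to_nat]
  congr 1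
  refine List.map_congr_left ?_
  intro i hi
  simp only [List.mem_range] at hi
  have h1 : ((l.length : Int) - i).toNat = l.length - i := by omega
  simp [h1]

theorem pvAlt_eq (word : String) : elasticize_alt word = String.ofList (pvCB word.toList) := by
  unfold elasticize_alt pvCB
  simp only []
  congr 1
  rw [pvRange_int_to_nat]
  congr 1
  refine List.map_congr_left ?_
  intro k hk
  simp only [List.mem_range] at hk
  have hk' : k < word.length := by simpa using hk
  have h1 : (min ((k : Int) + 1) ((word.length : Int) - k)).toNat
      = min (k + 1) (word.length - k) := by omega
  simp [h1]

-- getD of take / drop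
theorem pvGetD_take (cs : List Char) (m i : Nat) (hi : i < m) :
    (cs.take m).getD i ' ' = cs.getD i ' ' := by
  simp [List.getD, hi]

theorem pvGetD_drop (cs : List Char) (m i : Nat) :
    (cs.drop m).getD i ' ' = cs.getD (m + i) ' ' := by
  simp [List.getD, List.getElem?_drop]

-- even case: CB cs = PL (take m cs) ++ PR (drop m cs) when cs.length = 2*m
theorem pvCB_even (cs : List Char) (m : Nat) (h : cs.length = 2 * m) :
    pvCB cs = pvPL (cs.take m) ++ pvPR (cs.drop m) := by
  unfold pvCB pvPL pvPR
  have hTake : (cs.take m).length = m := by simp; omega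
  have hDrop : (cs.drop m).length = m := by rw [List.length_drop, h]; omega
  rw [hTake, hDrop, h, two_mul, List.range_add, List.map_append, List.flatten_append]
  congr 1
  · congr 1
    refine List.map_congr_left ?_
    intro i hi
    simp only [List.mem_range] at hi
    rw [pvGetD_take cs m i hi]
    congr 1
    omega
  · rw [List.map_map]
    congr 1
    refine List.map_congr_left ?_
    intro i hi
    simp only [List.mem_range] at hi
    simp only [Function.comp]
    rw [pvGetD_drop]
    have h2 : m + i = i + m := by omega
    rw [h2]
    congr 1
    omega

-- odd case: CB cs = PL (take m cs) ++ replicate (m+1) cs[m] ++ PR (drop (m+1) cs)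
theorem pvCB_odd (cs : List Char) (m : Nat) (h : cs.length = 2 * m + 1) :
    pvCB cs = pvPL (cs.take m) ++ List.replicate (m + 1) (cs.getD m ' ')
              ++ pvPR (cs.drop (m + 1)) := by
  unfold pvCB pvPL pvPR
  have hTake : (cs.take m).length = m := by simp; omega
  have hDrop : (cs.drop (m + 1)).length = m := by rw [List.length_drop, h]; omega
  have hsplit : cs.length = (m + 1) + m := by omega
  rw [hTake, hDrop, hsplit, List.range_add, List.range_succ,
      List.map_append, List.map_append, List.flatten_append, List.flatten_append]
  congr 1
  congr 1
  · refine congrArg List.flatten (List.map_congr_left ?_)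
    intro i hi
    simp only [List.mem_range] at hi
    rw [pvGetD_take cs m i hi]
    congr 1
    omega
  · simp only [List.map_cons, List.map_nil, List.flatten_cons, List.flatten_nil,
      List.append_nil]
    congr 1
    omega
  · rw [List.map_map]
    congr 1
    refine List.map_congr_left ?_
    intro i hi
    simp only [List.mem_range] at hi
    simp only [Function.comp]
    rw [pvGetD_drop]
    have h2 : m + 1 + i = i + (m + 1) := by omega
    rw [h2]
    congr 1
    omega

-- ===== VERDICT (by name: the statement is the Claim_ definition above) =====
theorem elasticize_spec : Claim_equal_elasticize := by
  intro word _
  unfold Spec_elasticize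
  have hl : word.toList.length = word.length := by simp
  rw [pvAlt_eq]
  unfold elasticize
  simp only []
  by_cases hpar : word.toList.length % 2 = 0
  · obtain ⟨m, hm⟩ : ∃ m, word.toList.length = 2 * m := ⟨word.toList.length / 2, by omega⟩
    have hmod : PySem.Int.mod (word.toList.length : Int) 2 = 0 := by
      rw [PySem.Int.mod_eq_emod_of_pos (by omega)]
      omega
    have hfd : PySem.Int.floordiv (word.toList.length : Int) 2 = ((m : Nat) : Int) := by
      rw [PySem.Int.floordiv_eq_ediv_of_pos (by omega)]
      omega
    rw [if_pos hmod, hfd, PySem.List.slice_to_natCast, PySem.List.slice_from_natCast,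
        pvLeftA_eq, pvRightA_eq, pvCB_even word.toList m hm]
  · obtain ⟨m, hm⟩ : ∃ m, word.toList.length = 2 * m + 1 := ⟨word.toList.length / 2, by omega⟩
    have hmod : PySem.Int.mod (word.toList.length : Int) 2 ≠ 0 := by
      rw [PySem.Int.mod_eq_emod_of_pos (by omega)]
      omega
    have hfd : PySem.Int.floordiv (word.toList.length : Int) 2 = ((m : Nat) : Int) := by
      rw [PySem.Int.floordiv_eq_ediv_of_pos (by omega)]
      omega
    have hcast : ((m : Nat) : Int) + 1 = (((m + 1 : Nat)) : Int) := by push_cast; ring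
    rw [if_neg hmod, hfd, hcast]
    simp only [PySem.List.slice_to_natCast, PySem.List.slice_from_natCast]
    have hTake : (word.toList.take m).length = m := by simp; omega
    have hwTake : List.take m (word.toList.take m ++ word.toList.drop (m + 1))
        = word.toList.take m := List.take_left' hTake
    have hwDrop : List.drop m (word.toList.take m ++ word.toList.drop (m + 1))
        = word.toList.drop (m + 1) := List.drop_left' hTake
    rw [hwTake, hwDrop, pvLeftA_eq, pvRightA_eq, pvCB_odd word.toList m hm]
    have hmid : (((m + 1 : Nat)) : Int).toNat = m + 1 := by omega
    have hchar : PySem.List.pyGetD word.toList ((m : Nat) : Int) ' ' = word.toList.getD m ' ' := by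
      simp
    rw [hmid, hchar]
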